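-- pv_equiv track=rewrite | github.com/alexandraback/datacollection | solutions_5644738749267968_1/Python/KidPooh/4.py | ken_chossing
-- ===== SOURCE A (Python) =====
-- def ken_chossing (chosen_naomi,weights_ken): #Ken's optimal way?
-- 	weights_ken.sort()
-- 	for weight in weights_ken:
-- 		if weight > chosen_naomi:
-- 			chosen = weight
-- 			weights_ken.remove(weight)
-- 			return chosen
-- 	chosen = weights_ken[0]
-- 	weights_ken.remove(chosen)
-- 	return chosen
-- ===== SOURCE B (Python) =====
-- def ken_chossing(chosen_naomi, weights_ken):
--     # Same in-place sort + removal side effects as A; binary search replaces the linear scan.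
--     weights_ken.sort()
--     lo, hi = 0, len(weights_ken)
--     while lo < hi:
--         mid = (lo + hi) // 2
--         if weights_ken[mid] > chosen_naomi:
--             hi = mid
--         else:
--             lo = mid + 1
--     if lo < len(weights_ken):
--         return weights_ken.pop(lo)
--     return weights_ken.pop(0)
-- ===== Notes on version B (the rewrite author's own statement) =====
-- stated objective: alternative
-- what changed: The linear scan for the first weight greater than chosen_naomi is replaced by a hand-written binary search (bisect_right) on the sorted list, followed by pop at the found index (or pop(0) when no weight is greater); side effects on weights_ken are identical.
import Mathlib
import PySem

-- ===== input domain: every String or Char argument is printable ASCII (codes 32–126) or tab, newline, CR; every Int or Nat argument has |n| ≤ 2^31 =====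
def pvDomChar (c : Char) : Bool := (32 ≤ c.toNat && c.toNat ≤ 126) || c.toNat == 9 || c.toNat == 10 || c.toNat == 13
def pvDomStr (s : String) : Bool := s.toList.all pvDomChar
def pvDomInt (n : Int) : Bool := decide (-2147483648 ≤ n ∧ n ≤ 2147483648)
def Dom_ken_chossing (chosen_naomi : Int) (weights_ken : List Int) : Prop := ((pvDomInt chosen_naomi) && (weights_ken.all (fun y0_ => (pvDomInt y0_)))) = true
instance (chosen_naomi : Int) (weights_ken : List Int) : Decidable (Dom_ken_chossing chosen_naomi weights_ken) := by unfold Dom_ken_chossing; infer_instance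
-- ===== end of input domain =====

-- B replaces A's linear scan for the first weight greater than chosen_naomi by a hand-written
-- binary search on the sorted list (alternative algorithm, same side effects on weights_ken;
-- the equivalence proved here is about the RETURN value, and both mutate weights_ken identically).

-- ===== PORT A =====
-- A's for-loop: return the first element of the sorted list strictly greater than chosen_naomi.
def kenLoop (chosen_naomi : Int) : List Int → Option Int
  | [] => none
  | w :: t => if w > chosen_naomi then some w else kenLoop chosen_naomi t

def ken_chossing (chosen_naomi : Int) (weights_ken : List Int) : Int :=
  let s := PySem.List.sorted weights_ken (fun x => x) false
  match kenLoop chosen_naomi s with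
  | some w => w
  | none => (PySem.List.pyGet? s 0).getD 0   -- weights_ken[0]; none (IndexError) excluded by Pre_

-- ===== PORT B =====
-- B's while-loop: binary search (bisect_right) over indices lo..hi of the sorted list.
def kenBsearch (s : List Int) (chosen_naomi : Int) (lo hi : Nat) : Nat :=
  if _ : lo < hi then
    let mid := (lo + hi) / 2
    if (s.getD mid 0) > chosen_naomi then kenBsearch s chosen_naomi lo mid
    else kenBsearch s chosen_naomi (mid + 1) hi
  else lo
termination_by hi - lo
decreasing_by all_goals omega

def ken_chossing_alt (chosen_naomi : Int) (weights_ken : List Int) : Int :=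
  let s := PySem.List.sorted weights_ken (fun x => x) false
  let lo := kenBsearch s chosen_naomi 0 s.length
  if lo < s.length then ((PySem.List.pop? s lo).getD (0, [])).1
  else ((PySem.List.pop? s 0).getD (0, [])).1   -- pop(0); none (IndexError) excluded by Pre_

-- ===== PRECONDITION & SPEC =====
-- A raises IndexError on an empty list and no weight > chosen_naomi path is reached; both ports
-- hit the same corner: exclude exactly the empty list.
def Pre_ken_chossing (chosen_naomi : Int) (weights_ken : List Int) : Prop := weights_ken ≠ []
instance (chosen_naomi : Int) (weights_ken : List Int) : Decidable (Pre_ken_chossing chosen_naomi weights_ken) := by unfold Pre_ken_chossing; infer_instance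
def pvWitness_ken_chossing : Int × List Int := (3, [5, 1, 4])

def Spec_ken_chossing (chosen_naomi : Int) (weights_ken : List Int) (out : Int) : Prop := out = ken_chossing_alt chosen_naomi weights_ken
instance (chosen_naomi : Int) (weights_ken : List Int) (out : Int) : Decidable (Spec_ken_chossing chosen_naomi weights_ken out) := by unfold Spec_ken_chossing; infer_instance

-- ===== CLAIM (what is proved, stated in full; the proofs are below) =====
def Claim_equal_ken_chossing : Prop := ∀ (chosen_naomi : Int) (weights_ken : List Int), Dom_ken_chossing chosen_naomi weights_ken → Pre_ken_chossing chosen_naomi weights_ken → Spec_ken_chossing chosen_naomi weights_ken (ken_chossing chosen_naomi weights_ken)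

-- ===== LEMMAS AND PROOFS =====

-- kenBsearch maintains the bisect_right invariant: everything strictly below the answer is ≤ x,
-- everything at or above it is > x (on a ≤-sorted list).
theorem kenBsearch_spec (s : List Int) (x : Int)
    (hs : s.Pairwise (· ≤ ·)) :
    ∀ (n lo hi : Nat), hi - lo ≤ n → lo ≤ hi → hi ≤ s.length →
    (∀ j (_ : j < s.length), j < lo → s[j] ≤ x) →
    (∀ j (_ : j < s.length), hi ≤ j → x < s[j]) →
    kenBsearch s x lo hi ≤ s.length ∧
    (∀ j (_ : j < s.length), j < kenBsearch s x lo hi → s[j] ≤ x) ∧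
    (∀ j (_ : j < s.length), kenBsearch s x lo hi ≤ j → x < s[j]) := by
  have hmono : ∀ (p q : Nat) (hp : p ≤ q) (hq : q < s.length), s[p] ≤ s[q] := by
    intro p q hp hq
    rcases Nat.eq_or_lt_of_le hp with h | h
    · subst h; exact le_refl _
    · exact (List.pairwise_iff_getElem.mp hs) p q (by omega) hq h
  intro n
  induction n with
  | zero =>
    intro lo hi hn hle hhi hblo hbhi
    have : ¬ lo < hi := by omega
    rw [kenBsearch]
    simp only [this, dif_neg, not_false_iff]
    exact ⟨by omega, hblo, fun j hj hmj => hbhi j hj (by omega)⟩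
  | succ m ih =>
    intro lo hi hn hle hhi hblo hbhi
    rw [kenBsearch]
    by_cases hlt : lo < hi
    · simp only [hlt, dif_pos]
      set mid := (lo + hi) / 2 with hmid
      have hm1 : lo ≤ mid := by omega
      have hm2 : mid < hi := by omega
      have hmlen : mid < s.length := by omega
      have hget : s.getD mid 0 = s[mid] := List.getD_eq_getElem s 0 hmlen
      by_cases hc : s.getD mid 0 > x
      · simp only [hc, if_pos]
        refine ih lo mid (by omega) (by omega) (by omega) hblo ?_
        intro j hj hmj
        calc x < s[mid] := by rw [← hget]; exact hc
          _ ≤ s[j] := hmono mid j hmj hj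
      · simp only [hc, if_neg, not_false_iff]
        refine ih (mid + 1) hi (by omega) (by omega) hhi ?_ hbhi
        intro j hj hmj
        rcases Nat.lt_or_ge j lo with h | h
        · exact hblo j hj h
        · calc s[j] ≤ s[mid] := hmono j mid (by omega) hmlen
            _ ≤ x := by rw [← hget]; omega
    · simp only [hlt, dif_neg, not_false_iff]
      exact ⟨by omega, hblo, fun j hj hmj => hbhi j hj (by omega)⟩

-- A's loop returns s[r] when r (the bisect point) is in range, none otherwise.
theorem kenLoop_eq (x : Int) : ∀ (s : List Int) (r : Nat),
    (∀ j (_ : j < s.length), j < r → s[j] ≤ x) →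
    (∀ j (_ : j < s.length), r ≤ j → x < s[j]) →
    kenLoop x s = if h : r < s.length then some s[r] else none := by
  intro s
  induction s with
  | nil => intro r _ _; simp [kenLoop]
  | cons w t ih =>
    intro r hlo hhi
    cases r with
    | zero =>
      have hw : x < w := hhi 0 (by simp) (by omega)
      simp [kenLoop, hw]
    | succ k =>
      have hw : w ≤ x := hlo 0 (by simp) (by omega)
      have : ¬ (w > x) := by omega
      simp only [kenLoop, this, if_neg, not_false_iff]
      have := ih k
        (fun j hj hjk => by
          have := hlo (j + 1) (by simpa using Nat.succ_lt_succ hj) (by omega)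
          simpa using this)
        (fun j hj hjk => by
          have := hhi (j + 1) (by simpa using Nat.succ_lt_succ hj) (by omega)
          simpa using this)
      rw [this]
      by_cases h : k < t.length
      · simp [h, Nat.succ_lt_succ h]
      · simp [h]

-- the two bodies agree on any ≤-sorted nonempty list
theorem ken_core (x : Int) (s : List Int) (hs : s.Pairwise (· ≤ ·)) (hne : s ≠ []) :
    (match kenLoop x s with
     | some w => w
     | none => (PySem.List.pyGet? s 0).getD 0) =
    (if kenBsearch s x 0 s.length < s.length
     then ((PySem.List.pop? s (kenBsearch s x 0 s.length : Nat)).getD (0, [])).1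
     else ((PySem.List.pop? s 0).getD (0, [])).1) := by
  obtain ⟨hr1, hr2, hr3⟩ := kenBsearch_spec s x hs s.length 0 s.length
    (by omega) (by omega) (le_refl _) (by omega) (by omega)
  have hloop := kenLoop_eq x s (kenBsearch s x 0 s.length) hr2 hr3
  by_cases h : kenBsearch s x 0 s.length < s.length
  · rw [hloop]
    simp only [dif_pos h, if_pos h]
    rw [PySem.List.pop?_natCast s _ h]
    simp
  · rw [hloop]
    simp only [dif_neg h, if_neg h]
    obtain ⟨a, t, rfl⟩ := List.exists_cons_of_ne_nil hne
    simp [PySem.List.pyGet?, PySem.List.pyIdx?, PySem.List.pop?]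

theorem ken_chossing_spec' (chosen_naomi : Int) (weights_ken : List Int)
    (hne : weights_ken ≠ []) :
    ken_chossing chosen_naomi weights_ken = ken_chossing_alt chosen_naomi weights_ken := by
  unfold ken_chossing ken_chossing_alt
  exact ken_core chosen_naomi (PySem.List.sorted weights_ken (fun x => x) false)
    (PySem.List.sorted_pairwise weights_ken (fun x => x))
    (by rw [Ne, PySem.List.sorted_eq_nil_iff]; exact hne)

-- ===== VERDICT (by name: the statement is the Claim_ definition above) =====
theorem ken_chossing_spec : Claim_equal_ken_chossing := by
  intro c ws _ hpre
  exact (ken_chossing_spec' c ws hpre).symm ▸ rfl
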